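-- pv_equiv track=rewrite | github.com/markmiller36-LVAY/lvay-scraper | import_oos_2025.py | build_school_records
-- ===== SOURCE A (Python) =====
-- def build_school_records(rows):
--     records = {}
--     for r in rows:
--         school = r["school"]
--         wl     = r["win_loss"]
--         if school not in records:
--             records[school] = {"wins": 0, "losses": 0, "ties": 0}
--         if wl == "W":
--             records[school]["wins"] += 1
--         elif wl == "L":
--             records[school]["losses"] += 1
--         elif wl in ("T", "Tie"):
--             records[school]["ties"] += 1
--     return records
-- ===== SOURCE B (Python) =====
-- def build_school_records(rows):
--     # Pass 1: group win_loss strings per school, first-appearance order.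
--     groups = {}
--     for r in rows:
--         groups.setdefault(r["school"], []).append(r["win_loss"])
--     # Pass 2: reshape each group into a record by counting outcomes.
--     return {
--         school: {
--             "wins": wls.count("W"),
--             "losses": wls.count("L"),
--             "ties": wls.count("T") + wls.count("Tie"),
--         }
--         for school, wls in groups.items()
--     }
-- ===== Notes on version B (the rewrite author's own statement) =====
-- stated objective: alternative
-- what changed: A mutates a per-school record dict while scanning the rows; B first groups the win_loss strings per school (insertion order, setdefault) and then builds each record in a second pass by counting 'W', 'L', 'T'/'Tie' in the group.
import Mathlib
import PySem

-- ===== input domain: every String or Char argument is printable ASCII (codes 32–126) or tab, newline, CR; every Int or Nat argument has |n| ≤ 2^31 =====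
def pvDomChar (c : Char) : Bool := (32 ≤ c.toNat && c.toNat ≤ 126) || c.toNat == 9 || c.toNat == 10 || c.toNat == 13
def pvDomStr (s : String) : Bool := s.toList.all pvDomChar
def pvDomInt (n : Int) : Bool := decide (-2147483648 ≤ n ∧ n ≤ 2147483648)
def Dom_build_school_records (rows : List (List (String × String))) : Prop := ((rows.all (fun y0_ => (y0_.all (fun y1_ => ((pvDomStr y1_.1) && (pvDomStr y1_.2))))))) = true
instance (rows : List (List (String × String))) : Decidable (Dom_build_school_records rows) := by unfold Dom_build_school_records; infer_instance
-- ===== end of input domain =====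

-- B replaces A's interleaved per-row record mutation by two passes: group the win_loss
-- strings per school first, then count each group once (objective: alternative decomposition).

-- r[k] for a row dict (first-match lookup); Pre_ guarantees k is present, so "" is never read
def pvRowGet (r : List (String × String)) (k : String) : String :=
  ((PySem.Dict.mk r).get? k).getD ""

-- ===== PORT A =====
-- {"wins": 0, "losses": 0, "ties": 0}
def pvInner0 : PySem.Dict String Int :=
  PySem.Dict.mk [("wins", 0), ("losses", 0), ("ties", 0)]

-- one iteration of A's loop body; the outer modify's default is never read (school was just ensured present)
def pvStepA (records : PySem.Dict String (PySem.Dict String Int)) (r : List (String × String)) :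
    PySem.Dict String (PySem.Dict String Int) :=
  let school := pvRowGet r "school"
  let wl := pvRowGet r "win_loss"
  let records := if records.contains school = false then records.insert school pvInner0 else records
  if wl = "W" then records.modify school pvInner0 (fun d => d.modify "wins" 0 (· + 1))
  else if wl = "L" then records.modify school pvInner0 (fun d => d.modify "losses" 0 (· + 1))
  else if wl = "T" ∨ wl = "Tie" then records.modify school pvInner0 (fun d => d.modify "ties" 0 (· + 1))
  else records

def build_school_records (rows : List (List (String × String))) : List (String × List (String × Int)) :=
  (rows.foldl pvStepA PySem.Dict.empty).items.map (fun p => (p.1, p.2.items))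

-- ===== PORT B =====
-- groups.setdefault(r["school"], []).append(r["win_loss"])
def pvStepB (groups : PySem.Dict String (List String)) (r : List (String × String)) :
    PySem.Dict String (List String) :=
  groups.modify (pvRowGet r "school") [] (fun l => l ++ [pvRowGet r "win_loss"])

def build_school_records_alt (rows : List (List (String × String))) : List (String × List (String × Int)) :=
  let groups := rows.foldl pvStepB PySem.Dict.empty
  groups.items.map (fun p =>
    (p.1, [("wins", (PySem.List.count p.2 "W" : Int)),
           ("losses", (PySem.List.count p.2 "L" : Int)),
           ("ties", (PySem.List.count p.2 "T" : Int) + (PySem.List.count p.2 "Tie" : Int))]))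

-- ===== PRECONDITION & SPEC =====
-- Pre_ excludes exactly the rows missing a "school" or "win_loss" key, on which A (and B) raise KeyError.
def Pre_build_school_records (rows : List (List (String × String))) : Prop :=
  ∀ r ∈ rows, (PySem.Dict.mk r).contains "school" = true ∧ (PySem.Dict.mk r).contains "win_loss" = true
instance (rows : List (List (String × String))) : Decidable (Pre_build_school_records rows) := by
  unfold Pre_build_school_records; infer_instance

def pvWitness_build_school_records : (List (List (String × String))) :=
  [[("school", "Acme"), ("win_loss", "W")], [("school", "Acme"), ("win_loss", "Tie")]]

def Spec_build_school_records (rows : List (List (String × String))) (out : List (String × List (String × Int))) : Prop := out = build_school_records_alt rows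
instance (rows : List (List (String × String))) (out : List (String × List (String × Int))) : Decidable (Spec_build_school_records rows out) := by unfold Spec_build_school_records; infer_instance

-- ===== CLAIM (what is proved, stated in full; the proofs are below) =====
def Claim_equal_build_school_records : Prop := ∀ (rows : List (List (String × String))), Dom_build_school_records rows → Pre_build_school_records rows → Spec_build_school_records rows (build_school_records rows)

-- ===== LEMMAS AND PROOFS =====

-- A's per-row update of the record at one school, as a single function on the inner dict
def pvAddW (v : PySem.Dict String Int) (w : String) : PySem.Dict String Int :=
  if w = "W" then v.modify "wins" 0 (· + 1)
  else if w = "L" then v.modify "losses" 0 (· + 1)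
  else if w = "T" ∨ w = "Tie" then v.modify "ties" 0 (· + 1)
  else v

theorem pv_keys_modify' {ν : Type} (d : PySem.Dict String ν) (k : String) (d0 : ν) (f : ν → ν) :
    (d.modify k d0 f).keys = if d.contains k = true then d.keys else d.keys ++ [k] := by
  rw [PySem.Dict.keys_modify]
  split_ifs with h
  · exact PySem.Dict.keys_insert_of_contains _ _ h
  · exact PySem.Dict.keys_insert_of_not_contains _ _ (by simp [h])

theorem pv_keys_stepA (d : PySem.Dict String (PySem.Dict String Int)) (r : List (String × String)) :
    (pvStepA d r).keys
      = if d.contains (pvRowGet r "school") = true then d.keys else d.keys ++ [pvRowGet r "school"] := by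
  simp only [pvStepA]
  split_ifs with h1 <;>
    simp_all [pv_keys_modify', PySem.Dict.contains_insert,
      PySem.Dict.keys_insert_of_not_contains, PySem.Dict.keys_insert_of_contains]

theorem pv_keys_stepB (g : PySem.Dict String (List String)) (r : List (String × String)) :
    (pvStepB g r).keys
      = if g.contains (pvRowGet r "school") = true then g.keys else g.keys ++ [pvRowGet r "school"] := by
  unfold pvStepB
  exact pv_keys_modify' _ _ _ _

theorem pv_keys_foldAB (rows : List (List (String × String)))
    (d : PySem.Dict String (PySem.Dict String Int)) (g : PySem.Dict String (List String))
    (h : d.keys = g.keys) :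
    (rows.foldl pvStepA d).keys = (rows.foldl pvStepB g).keys := by
  induction rows generalizing d g with
  | nil => simpa using h
  | cons r rest ih =>
    simp only [List.foldl_cons]
    apply ih
    rw [pv_keys_stepA, pv_keys_stepB, PySem.Dict.contains_eq_decide_mem_keys,
      PySem.Dict.contains_eq_decide_mem_keys, h]

theorem pv_getD_ensure (d : PySem.Dict String (PySem.Dict String Int)) (s t : String) :
    ((if d.contains s = false then d.insert s pvInner0 else d) : PySem.Dict String (PySem.Dict String Int)).getD t pvInner0
      = d.getD t pvInner0 := by
  split_ifs with h
  · rw [PySem.Dict.getD_insert]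
    split_ifs with ht
    · subst ht; rw [PySem.Dict.getD_of_not_contains _ _ h]
    · rfl
  · rfl

theorem pv_getD_stepA (d : PySem.Dict String (PySem.Dict String Int)) (r : List (String × String)) (t : String) :
    (pvStepA d r).getD t pvInner0
      = if t = pvRowGet r "school" then pvAddW (d.getD (pvRowGet r "school") pvInner0) (pvRowGet r "win_loss")
        else d.getD t pvInner0 := by
  have hE : ∀ u, ((if d.contains (pvRowGet r "school") = false then d.insert (pvRowGet r "school") pvInner0 else d) : PySem.Dict String (PySem.Dict String Int)).getD u pvInner0 = d.getD u pvInner0 :=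
    fun u => pv_getD_ensure d _ u
  simp only [pvStepA, pvAddW]
  split_ifs <;> simp_all [PySem.Dict.getD_modify, hE] <;> split_ifs <;> simp_all

theorem pv_getD_foldA (rows : List (List (String × String))) (d : PySem.Dict String (PySem.Dict String Int)) (s : String) :
    (rows.foldl pvStepA d).getD s pvInner0
      = ((rows.filter (fun r => pvRowGet r "school" == s)).map (fun r => pvRowGet r "win_loss")).foldl
          pvAddW (d.getD s pvInner0) := by
  induction rows generalizing d with
  | nil => rfl
  | cons r rest ih =>
    simp only [List.foldl_cons, List.filter_cons]
    rw [ih, pv_getD_stepA]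
    by_cases h : pvRowGet r "school" = s
    · subst h; simp
    · simp [h, Ne.symm h, beq_iff_eq]

theorem pv_foldl_addW (wls : List String) (a b c : Int) :
    wls.foldl pvAddW (PySem.Dict.mk [("wins", a), ("losses", b), ("ties", c)])
      = PySem.Dict.mk [("wins", a + PySem.List.count wls "W"),
                       ("losses", b + PySem.List.count wls "L"),
                       ("ties", c + PySem.List.count wls "T" + PySem.List.count wls "Tie")] := by
  induction wls generalizing a b c with
  | nil => simp [PySem.List.count]
  | cons w rest ih =>
    simp only [List.foldl_cons]
    have hstep : ∀ x y z : Int, pvAddW (PySem.Dict.mk [("wins", x), ("losses", y), ("ties", z)]) w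
        = PySem.Dict.mk [("wins", x + if w = "W" then 1 else 0),
                         ("losses", y + if w = "L" then 1 else 0),
                         ("ties", z + if (w = "T" ∨ w = "Tie") ∧ ¬ (w = "W" ∨ w = "L") then 1 else 0)] := by
      intro x y z
      unfold pvAddW
      split_ifs with h1 h2 h3 <;>
        simp_all [PySem.Dict.modify, PySem.Dict.insert, PySem.Dict.getD, PySem.Dict.get?, PySem.Dict.contains]
    rw [hstep, ih]
    have hc : ∀ (t : String), PySem.List.count (w :: rest) t = (if w = t then 1 else 0) + PySem.List.count rest t := by
      intro t; simp [PySem.List.count, List.count_cons, beq_iff_eq]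
      by_cases h : w = t <;> simp [h] <;> omega
    simp only [hc]
    congr 1
    by_cases h1 : w = "W" <;> by_cases h2 : w = "L" <;> by_cases h3 : w = "T" <;> by_cases h4 : w = "Tie" <;>
      simp_all <;> push_cast <;> ring_nf <;> simp_all

theorem pv_final (rows : List (List (String × String))) :
    (rows.foldl pvStepA PySem.Dict.empty).items.map (fun p => (p.1, p.2.items))
      = (rows.foldl pvStepB PySem.Dict.empty).items.map (fun p =>
          (p.1, [("wins", (PySem.List.count p.2 "W" : Int)),
                 ("losses", (PySem.List.count p.2 "L" : Int)),
                 ("ties", (PySem.List.count p.2 "T" : Int) + (PySem.List.count p.2 "Tie" : Int))])) := by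
  have hBfold : rows.foldl pvStepB PySem.Dict.empty
      = (rows.map (fun r => (pvRowGet r "school", pvRowGet r "win_loss"))).foldl
          (fun d p => d.modify p.1 [] (fun l => l ++ [p.2])) PySem.Dict.empty := by
    rw [List.foldl_map]; rfl
  have hB : ∀ k, (rows.foldl pvStepB PySem.Dict.empty).getD k []
      = (rows.filter (fun r => pvRowGet r "school" == k)).map (fun r => pvRowGet r "win_loss") := by
    intro k
    rw [hBfold, PySem.Dict.getD_foldl_modify_append]
    simp only [List.filter_map, List.map_map, PySem.Dict.getD_empty, List.nil_append]
    rfl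
  have hA : ∀ k, (rows.foldl pvStepA PySem.Dict.empty).getD k pvInner0
      = PySem.Dict.mk
          [("wins", (PySem.List.count ((rows.filter (fun r => pvRowGet r "school" == k)).map (fun r => pvRowGet r "win_loss")) "W" : Int)),
           ("losses", (PySem.List.count ((rows.filter (fun r => pvRowGet r "school" == k)).map (fun r => pvRowGet r "win_loss")) "L" : Int)),
           ("ties", (PySem.List.count ((rows.filter (fun r => pvRowGet r "school" == k)).map (fun r => pvRowGet r "win_loss")) "T" : Int)
             + (PySem.List.count ((rows.filter (fun r => pvRowGet r "school" == k)).map (fun r => pvRowGet r "win_loss")) "Tie" : Int))] := by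
    intro k
    rw [pv_getD_foldA, PySem.Dict.getD_empty]
    have : pvInner0 = PySem.Dict.mk [("wins", (0:Int)), ("losses", 0), ("ties", 0)] := rfl
    rw [this, pv_foldl_addW]
    simp
  have hstepB : pvStepB = fun (d : PySem.Dict String (List String)) (x : List (String × String)) =>
      d.modify ((fun r => pvRowGet r "school") x) []
        ((fun (_ : PySem.Dict String (List String)) (x : List (String × String)) (l : List String) =>
          l ++ [pvRowGet x "win_loss"]) d x) := rfl
  have hnodupB : (rows.foldl pvStepB PySem.Dict.empty).keys.Nodup := by
    rw [hstepB]
    exact PySem.Dict.nodup_keys_foldl_modify_key rows _ _ _ _ (by simp [PySem.Dict.keys_empty])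
  have hkeys : (rows.foldl pvStepA PySem.Dict.empty).keys = (rows.foldl pvStepB PySem.Dict.empty).keys :=
    pv_keys_foldAB rows _ _ (by simp [PySem.Dict.keys_empty])
  have hnodupA : (rows.foldl pvStepA PySem.Dict.empty).keys.Nodup := by rw [hkeys]; exact hnodupB
  rw [PySem.Dict.items_eq_map_keys _ hnodupA pvInner0, PySem.Dict.items_eq_map_keys _ hnodupB [],
    hkeys, List.map_map, List.map_map]
  apply List.map_congr_left
  intro k _
  simp only [Function.comp]
  rw [hA k, hB k]

-- ===== VERDICT (by name: the statement is the Claim_ definition above) =====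
theorem build_school_records_spec : Claim_equal_build_school_records := by
  intro rows _dom _pre
  unfold Spec_build_school_records build_school_records build_school_records_alt
  exact pv_final rows
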